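-- pv_equiv track=rewrite | github.com/mars-s/pdfspy | app/hazard_classifier.py | classify_hazard_statements
-- ===== SOURCE A (Python) =====
-- from typing import Dict, List
--
-- def classify_hazard_statements(h_codes: List[str]) -> Dict[str, List[str]]:
--     """Classify H-codes into hazard categories"""
--     classification = {
--         'physical_hazards': [],
--         'health_hazards': [],
--         'environmental_hazards': []
--     }
--
--     for code in h_codes:
--         if not code.startswith('H'):
--             continue
--
--         try:
--             code_num = int(code[1:4])  # Extract numeric part (H123 -> 123)
--
--             if 200 <= code_num <= 299:
--                 classification['physical_hazards'].append(code)
--             elif 300 <= code_num <= 399: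
--                 classification['health_hazards'].append(code)
--             elif 400 <= code_num <= 499:
--                 classification['environmental_hazards'].append(code)
--         except ValueError:
--             # Handle codes with letters after numbers (e.g., H315a)
--             continue
--
--     return classification
-- ===== SOURCE B (Python) =====
-- from typing import Dict, List
--
-- def classify_hazard_statements(h_codes: List[str]) -> Dict[str, List[str]]:
--     """Classify H-codes into hazard categories: parse once, then filter per category."""
--     parsed = []
--     for code in h_codes:
--         if code.startswith('H'):
--             try:
--                 parsed.append((code, int(code[1:4])))
--             except ValueError:
--                 pass
--     return {
--         'physical_hazards': [c for c, n in parsed if 200 <= n <= 299],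
--         'health_hazards': [c for c, n in parsed if 300 <= n <= 399],
--         'environmental_hazards': [c for c, n in parsed if 400 <= n <= 499],
--     }
-- ===== Notes on version B (the rewrite author's own statement) =====
-- stated objective: alternative
-- what changed: Replaces A's single loop that appends into a mutable three-list dict via a branch cascade with a parse pass building a (code, number) table followed by three independent range-filter comprehensions, one per category.
import Mathlib
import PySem

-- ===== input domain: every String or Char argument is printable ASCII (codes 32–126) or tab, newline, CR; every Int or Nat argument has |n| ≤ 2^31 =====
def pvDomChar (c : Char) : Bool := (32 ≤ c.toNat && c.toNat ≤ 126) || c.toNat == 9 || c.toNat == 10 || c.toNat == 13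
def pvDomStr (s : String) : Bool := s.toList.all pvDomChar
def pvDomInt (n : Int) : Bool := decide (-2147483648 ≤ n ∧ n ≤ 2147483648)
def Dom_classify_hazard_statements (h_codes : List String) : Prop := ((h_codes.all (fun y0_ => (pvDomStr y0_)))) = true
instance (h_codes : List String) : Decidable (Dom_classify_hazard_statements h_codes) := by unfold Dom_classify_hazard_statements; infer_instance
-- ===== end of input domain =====

-- B replaces A's single loop appending into a mutable three-list dict with a parse pass
-- building a (code, number) table followed by three independent range filters (objective: alternative).


-- ===== PORT A =====
-- loop body of A: dict update for one code (branch cascade, append in place via modify)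
def hazardStep (d : PySem.Dict String (List String)) (code : String) : PySem.Dict String (List String) :=
  if ¬ PySem.Str.startswith code "H" then d
  else
    match PySem.Int.ofStr? (PySem.Str.slice code (some 1) (some 4)) with
    | none => d   -- ValueError: continue
    | some code_num =>
      if 200 ≤ code_num ∧ code_num ≤ 299 then d.modify "physical_hazards" [] (· ++ [code])
      else if 300 ≤ code_num ∧ code_num ≤ 399 then d.modify "health_hazards" [] (· ++ [code])
      else if 400 ≤ code_num ∧ code_num ≤ 499 then d.modify "environmental_hazards" [] (· ++ [code])
      else d

def classify_hazard_statements (h_codes : List String) : List (String × List String) :=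
  let classification : PySem.Dict String (List String) :=
    PySem.Dict.ofList [("physical_hazards", []), ("health_hazards", []), ("environmental_hazards", [])]
  (h_codes.foldl hazardStep classification).items

-- ===== PORT B =====
-- B's parse step: (code, int(code[1:4])) for codes starting with 'H' that parse, else skipped
def parseHCode (code : String) : Option (String × Int) :=
  if PySem.Str.startswith code "H" then
    (PySem.Int.ofStr? (PySem.Str.slice code (some 1) (some 4))).map (fun n => (code, n))
  else none

def classify_hazard_statements_alt (h_codes : List String) : List (String × List String) :=
  let parsed := h_codes.filterMap parseHCode
  [("physical_hazards", (parsed.filter (fun q => decide (200 ≤ q.2 ∧ q.2 ≤ 299))).map Prod.fst),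
   ("health_hazards", (parsed.filter (fun q => decide (300 ≤ q.2 ∧ q.2 ≤ 399))).map Prod.fst),
   ("environmental_hazards", (parsed.filter (fun q => decide (400 ≤ q.2 ∧ q.2 ≤ 499))).map Prod.fst)]

-- ===== PRECONDITION & SPEC =====
def Spec_classify_hazard_statements (h_codes : List String) (out : List (String × List String)) : Prop := out = classify_hazard_statements_alt h_codes
instance (h_codes : List String) (out : List (String × List String)) : Decidable (Spec_classify_hazard_statements h_codes out) := by unfold Spec_classify_hazard_statements; infer_instance

-- ===== CLAIM (what is proved, stated in full; the proofs are below) =====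
def Claim_equal_classify_hazard_statements : Prop := ∀ (h_codes : List String), Dom_classify_hazard_statements h_codes → Spec_classify_hazard_statements h_codes (classify_hazard_statements h_codes)

-- ===== LEMMAS AND PROOFS =====
-- the three dict updates on the fixed-shape dict, as plain list rewrites
lemma modify_phys (p h e : List String) (f : List String → List String) :
    (PySem.Dict.ofList [("physical_hazards", p), ("health_hazards", h), ("environmental_hazards", e)]).modify "physical_hazards" [] f
    = PySem.Dict.ofList [("physical_hazards", f p), ("health_hazards", h), ("environmental_hazards", e)] := rfl

lemma modify_health (p h e : List String) (f : List String → List String) :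
    (PySem.Dict.ofList [("physical_hazards", p), ("health_hazards", h), ("environmental_hazards", e)]).modify "health_hazards" [] f
    = PySem.Dict.ofList [("physical_hazards", p), ("health_hazards", f h), ("environmental_hazards", e)] := rfl

lemma modify_env (p h e : List String) (f : List String → List String) :
    (PySem.Dict.ofList [("physical_hazards", p), ("health_hazards", h), ("environmental_hazards", e)]).modify "environmental_hazards" [] f
    = PySem.Dict.ofList [("physical_hazards", p), ("health_hazards", h), ("environmental_hazards", f e)] := rfl

lemma items_shape (p h e : List String) :
    (PySem.Dict.ofList [("physical_hazards", p), ("health_hazards", h), ("environmental_hazards", e)]).items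
    = [("physical_hazards", p), ("health_hazards", h), ("environmental_hazards", e)] := rfl

-- category selectors, B-shaped
def selP (codes : List String) : List String :=
  ((codes.filterMap parseHCode).filter (fun q => decide (200 ≤ q.2 ∧ q.2 ≤ 299))).map Prod.fst
def selH (codes : List String) : List String :=
  ((codes.filterMap parseHCode).filter (fun q => decide (300 ≤ q.2 ∧ q.2 ≤ 399))).map Prod.fst
def selE (codes : List String) : List String :=
  ((codes.filterMap parseHCode).filter (fun q => decide (400 ≤ q.2 ∧ q.2 ≤ 499))).map Prod.fst

-- one-step facts about A's loop body and B's parse on a single code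
lemma hazardStep_skip (d : PySem.Dict String (List String)) (code : String)
    (h : PySem.Str.startswith code "H" = false) : hazardStep d code = d := by
  unfold hazardStep; rw [h]; simp

lemma hazardStep_none (d : PySem.Dict String (List String)) (code : String)
    (h1 : PySem.Str.startswith code "H" = true)
    (h2 : PySem.Int.ofStr? (PySem.Str.slice code (some 1) (some 4)) = none) :
    hazardStep d code = d := by
  unfold hazardStep; rw [h1, h2]; simp

lemma hazardStep_some (d : PySem.Dict String (List String)) (code : String) (n : Int)
    (h1 : PySem.Str.startswith code "H" = true)
    (h2 : PySem.Int.ofStr? (PySem.Str.slice code (some 1) (some 4)) = some n) :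
    hazardStep d code =
      (if 200 ≤ n ∧ n ≤ 299 then d.modify "physical_hazards" [] (· ++ [code])
       else if 300 ≤ n ∧ n ≤ 399 then d.modify "health_hazards" [] (· ++ [code])
       else if 400 ≤ n ∧ n ≤ 499 then d.modify "environmental_hazards" [] (· ++ [code])
       else d) := by
  unfold hazardStep; rw [h1, h2]; simp

lemma parseHCode_skip (code : String) (h : PySem.Str.startswith code "H" = false) :
    parseHCode code = none := by
  unfold parseHCode; rw [h]; simp

lemma parseHCode_none (code : String) (h1 : PySem.Str.startswith code "H" = true)
    (h2 : PySem.Int.ofStr? (PySem.Str.slice code (some 1) (some 4)) = none) :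
    parseHCode code = none := by
  unfold parseHCode; rw [h1, h2]; simp

lemma parseHCode_some (code : String) (n : Int) (h1 : PySem.Str.startswith code "H" = true)
    (h2 : PySem.Int.ofStr? (PySem.Str.slice code (some 1) (some 4)) = some n) :
    parseHCode code = some (code, n) := by
  unfold parseHCode; rw [h1, h2]; simp

-- loop invariant: A's fold over `codes`, started from accumulators (p, h, e), lands on
-- those accumulators extended by B's three selections from `codes`
lemma fold_inv (codes : List String) : ∀ (p h e : List String),
    (codes.foldl hazardStep (PySem.Dict.ofList [("physical_hazards", p), ("health_hazards", h), ("environmental_hazards", e)])).items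
    = [("physical_hazards", p ++ selP codes), ("health_hazards", h ++ selH codes), ("environmental_hazards", e ++ selE codes)] := by
  induction codes with
  | nil => intro p h e; simp [items_shape, selP, selH, selE]
  | cons c rest ih =>
    intro p h e
    simp only [List.foldl_cons]
    rcases hs : PySem.Str.startswith c "H" with _ | _
    · rw [hazardStep_skip _ _ hs, ih]
      simp [selP, selH, selE, parseHCode_skip c hs]
    · cases hn : PySem.Int.ofStr? (PySem.Str.slice c (some 1) (some 4)) with
      | none =>
        rw [hazardStep_none _ _ hs hn, ih]
        simp [selP, selH, selE, parseHCode_none c hs hn]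
      | some n =>
        rw [hazardStep_some _ _ _ hs hn]
        by_cases h2 : 200 ≤ n ∧ n ≤ 299
        · rw [if_pos h2, modify_phys, ih]
          have d2 : decide (200 ≤ n ∧ n ≤ 299) = true := by simp [h2]
          have d3 : decide (300 ≤ n ∧ n ≤ 399) = false := by simp; omega
          have d4 : decide (400 ≤ n ∧ n ≤ 499) = false := by simp; omega
          simp only [selP, selH, selE, List.filterMap_cons, parseHCode_some c n hs hn,
            List.filter_cons, d2, d3, d4]
          simp
        · rw [if_neg h2]
          by_cases h3 : 300 ≤ n ∧ n ≤ 399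
          · rw [if_pos h3, modify_health, ih]
            have d2 : decide (200 ≤ n ∧ n ≤ 299) = false := by simp; omega
            have d3 : decide (300 ≤ n ∧ n ≤ 399) = true := by simp [h3]
            have d4 : decide (400 ≤ n ∧ n ≤ 499) = false := by simp; omega
            simp only [selP, selH, selE, List.filterMap_cons, parseHCode_some c n hs hn,
              List.filter_cons, d2, d3, d4]
            simp
          · rw [if_neg h3]
            by_cases h4 : 400 ≤ n ∧ n ≤ 499
            · rw [if_pos h4, modify_env, ih]
              have d2 : decide (200 ≤ n ∧ n ≤ 299) = false := by simp; omega
              have d3 : decide (300 ≤ n ∧ n ≤ 399) = false := by simp; omega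
              have d4 : decide (400 ≤ n ∧ n ≤ 499) = true := by simp [h4]
              simp only [selP, selH, selE, List.filterMap_cons, parseHCode_some c n hs hn,
                List.filter_cons, d2, d3, d4]
              simp
            · rw [if_neg h4, ih]
              have c2 : decide (200 ≤ n ∧ n ≤ 299) = false := by simp; omega
              have c3 : decide (300 ≤ n ∧ n ≤ 399) = false := by simp; omega
              have c4 : decide (400 ≤ n ∧ n ≤ 499) = false := by simp; omega
              simp only [selP, selH, selE, List.filterMap_cons, parseHCode_some c n hs hn,
                List.filter_cons, c2, c3, c4]
              simp

-- ===== VERDICT (by name: the statement is the Claim_ definition above) =====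
theorem classify_hazard_statements_spec : Claim_equal_classify_hazard_statements := by
  intro h_codes _
  show classify_hazard_statements h_codes = classify_hazard_statements_alt h_codes
  unfold classify_hazard_statements classify_hazard_statements_alt
  rw [fold_inv]
  simp [selP, selH, selE]
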